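-- pv_equiv track=rewrite | github.com/coffeebearchen/video_agent2 | scripts/test_hybrid_comparison.py | find_top_extra_candidate
-- ===== SOURCE A (Python) =====
-- def normalize_text(text: str) -> str:
--     return str(text or "").replace(" ", "").strip()
--
-- def find_top_extra_candidate(rule_candidates: list[str], hybrid_candidates: list[str], hybrid_scores: list[int]) -> tuple[str, int]:
--     rule_set = {normalize_text(item) for item in rule_candidates}
--     best_text = ""
--     best_score = -1
--
--     for index, candidate in enumerate(hybrid_candidates):
--         normalized = normalize_text(candidate)
--         if normalized in rule_set:
--             continue
--         score = hybrid_scores[index] if index < len(hybrid_scores) else 0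
--         if score > best_score:
--             best_text = candidate
--             best_score = score
--
--     if best_score < 0:
--         return "", 0
--
--     return best_text, best_score
-- ===== SOURCE B (Python) =====
-- def normalize_text(text: str) -> str:
--     return str(text or "").replace(" ", "").strip()
--
-- def find_top_extra_candidate(rule_candidates: list[str], hybrid_candidates: list[str], hybrid_scores: list[int]) -> tuple[str, int]:
--     rule_set = {normalize_text(item) for item in rule_candidates}
--
--     def eff(i: int) -> int:
--         return hybrid_scores[i] if i < len(hybrid_scores) else 0
--
--     # Pass 1: compute only the maximum effective score among eligible candidates.
--     best = None
--     for i, c in enumerate(hybrid_candidates):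
--         if normalize_text(c) in rule_set:
--             continue
--         s = eff(i)
--         if best is None or best < s:
--             best = s
--
--     if best is None or best < 0:
--         return "", 0
--
--     # Pass 2: locate the first eligible candidate attaining that score.
--     for i, c in enumerate(hybrid_candidates):
--         if normalize_text(c) not in rule_set and eff(i) == best:
--             return c, best
--     return "", 0  # unreachable: the maximum is attained by some eligible candidate
-- ===== Notes on version B (the rewrite author's own statement) =====
-- stated objective: alternative
-- what changed: Replaces A's single pass that tracks a (best_text, best_score) pair with two staged passes over different state: pass 1 computes only the maximum eligible score as an Optional[int], pass 2 searches for the first eligible candidate attaining it; the tie-break (first attaining candidate) and the negative-max -> ('',0) rule fall out of the staging instead of the -1 seed.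
import Mathlib
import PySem

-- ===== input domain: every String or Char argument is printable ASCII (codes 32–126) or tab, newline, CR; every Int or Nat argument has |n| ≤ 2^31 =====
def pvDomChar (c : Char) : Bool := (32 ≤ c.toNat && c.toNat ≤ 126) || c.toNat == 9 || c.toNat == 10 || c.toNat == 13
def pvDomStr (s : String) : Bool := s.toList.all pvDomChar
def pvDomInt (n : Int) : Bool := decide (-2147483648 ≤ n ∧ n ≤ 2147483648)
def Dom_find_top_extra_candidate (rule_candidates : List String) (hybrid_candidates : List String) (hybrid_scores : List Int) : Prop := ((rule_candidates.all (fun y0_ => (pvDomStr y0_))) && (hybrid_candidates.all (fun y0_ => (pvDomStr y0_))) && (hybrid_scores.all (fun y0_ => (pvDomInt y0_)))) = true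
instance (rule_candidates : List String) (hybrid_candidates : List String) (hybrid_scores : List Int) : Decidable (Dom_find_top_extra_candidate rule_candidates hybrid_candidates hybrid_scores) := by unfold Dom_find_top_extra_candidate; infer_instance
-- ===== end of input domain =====

-- B replaces A's single running-best (text, score) pass by two staged passes: pass 1 computes
-- only the maximum eligible score (Optional), pass 2 finds the first candidate attaining it.

-- ===== PORT A =====
-- normalize_text: 'str(text or "")' is the identity on str arguments ("" stays ""), so the
-- port is replace-then-strip (exact on the stated ASCII domain via PySem.Str).
def pvNormalize (s : String) : String := PySem.Str.strip (PySem.Str.replace s " " "")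

-- rule_set = {normalize_text(item) for item in rule_candidates}  (identical line in A and B)
def pvRuleSet (rc : List String) : PySem.Set String := PySem.Set.ofList (rc.map pvNormalize)

-- score = hybrid_scores[index] if index < len(hybrid_scores) else 0  (identical expression in
-- A and B; the index is nonnegative and guarded in range, so pyGetD is exact)
def pvScore (hs : List Int) (i : Int) : Int :=
  if i < (hs.length : Int) then PySem.List.pyGetD hs i 0 else 0

def find_top_extra_candidate (rule_candidates : List String) (hybrid_candidates : List String) (hybrid_scores : List Int) : String × Int :=
  let r := (PySem.List.enumerate hybrid_candidates).foldl
    (fun (b : String × Int) ic =>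
      if (pvRuleSet rule_candidates).contains (pvNormalize ic.2) then b
      else if b.2 < pvScore hybrid_scores ic.1 then (ic.2, pvScore hybrid_scores ic.1) else b)
    ("", -1)
  if r.2 < 0 then ("", 0) else r

-- ===== PORT B =====
def find_top_extra_candidate_alt (rule_candidates : List String) (hybrid_candidates : List String) (hybrid_scores : List Int) : String × Int :=
  -- pass 1: best = max eligible effective score, as an Option
  let best := (PySem.List.enumerate hybrid_candidates).foldl
    (fun (m : Option Int) ic =>
      if (pvRuleSet rule_candidates).contains (pvNormalize ic.2) then m
      else match m with
        | none => some (pvScore hybrid_scores ic.1)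
        | some v => if v < pvScore hybrid_scores ic.1 then some (pvScore hybrid_scores ic.1) else some v)
    none
  match best with
  | none => ("", 0)
  | some m =>
    if m < 0 then ("", 0)
    else
      -- pass 2: first eligible candidate attaining the maximum
      match (PySem.List.enumerate hybrid_candidates).find?
        (fun ic => !(pvRuleSet rule_candidates).contains (pvNormalize ic.2)
                   && pvScore hybrid_scores ic.1 == m) with
      | some ic => (ic.2, m)
      | none => ("", 0)  -- unreachable

-- ===== PRECONDITION & SPEC =====
def Spec_find_top_extra_candidate (rule_candidates : List String) (hybrid_candidates : List String) (hybrid_scores : List Int) (out : String × Int) : Prop := out = find_top_extra_candidate_alt rule_candidates hybrid_candidates hybrid_scores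
instance (rule_candidates : List String) (hybrid_candidates : List String) (hybrid_scores : List Int) (out : String × Int) : Decidable (Spec_find_top_extra_candidate rule_candidates hybrid_candidates hybrid_scores out) := by unfold Spec_find_top_extra_candidate; infer_instance

-- ===== CLAIM =====
def Claim_equal_find_top_extra_candidate : Prop := ∀ (rule_candidates : List String) (hybrid_candidates : List String) (hybrid_scores : List Int), Dom_find_top_extra_candidate rule_candidates hybrid_candidates hybrid_scores → Spec_find_top_extra_candidate rule_candidates hybrid_candidates hybrid_scores (find_top_extra_candidate rule_candidates hybrid_candidates hybrid_scores)

-- ===== LEMMAS AND PROOFS =====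

-- a fold whose body skips guarded elements = the plain fold over the filtered list
theorem pv_foldl_guard {α β : Type} (pred : α → Bool) (g : β → α → β) :
    ∀ (l : List α) (b : β),
      l.foldl (fun b x => if pred x then b else g b x) b
      = (l.filter (fun x => !pred x)).foldl g b := by
  intro l
  induction l with
  | nil => intro b; rfl
  | cons x xs ih =>
      intro b
      by_cases h : pred x = true <;> simp [h, ih]

-- find? on a filtered list = find? with the conjoined predicate
theorem pv_find?_filter {α : Type} (p q : α → Bool) :
    ∀ (l : List α), (l.filter p).find? q = l.find? (fun x => p x && q x) := by
  intro l
  induction l with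
  | nil => rfl
  | cons x xs ih =>
      by_cases hp : p x = true
      · by_cases hq : q x = true <;> simp [List.find?, hp, hq, ih]
      · simp [List.find?, hp, ih]

-- the combined invariant of the two folds over the eligible list, proved back-to-front
theorem pv_invariant (g : Int × String → Int) :
    ∀ (l : List (Int × String)),
      (l = [] ∧
        l.foldl (fun (m : Option Int) p =>
          match m with
          | none => some (g p)
          | some v => if v < g p then some (g p) else some v) none = none ∧
        l.foldl (fun (b : String × Int) p => if b.2 < g p then (p.2, g p) else b) ("", -1) = ("", -1))
      ∨ (∃ m p,
        l.foldl (fun (m : Option Int) p =>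
          match m with
          | none => some (g p)
          | some v => if v < g p then some (g p) else some v) none = some m ∧
        (∀ q ∈ l, g q ≤ m) ∧
        l.find? (fun q => g q == m) = some p ∧ g p = m ∧
        (if -1 < m
          then l.foldl (fun (b : String × Int) p => if b.2 < g p then (p.2, g p) else b) ("", -1) = (p.2, m)
          else l.foldl (fun (b : String × Int) p => if b.2 < g p then (p.2, g p) else b) ("", -1) = ("", -1))) := by
  intro l
  induction l using List.reverseRecOn with
  | nil => left; exact ⟨rfl, rfl, rfl⟩
  | append_singleton l x ih =>
      right
      rcases ih with ⟨hnil, _, _⟩ | ⟨m, p, hm, hbound, hfind, hgp, hafold⟩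
      · subst hnil
        refine ⟨g x, x, rfl, by simp, by simp, rfl, ?_⟩
        by_cases h : -1 < g x <;> simp [List.foldl, h]
      · by_cases hlt : m < g x
        · -- new maximum at x
          have hfind' : (l ++ [x]).find? (fun q => g q == g x) = some x := by
            rw [List.find?_append]
            have : l.find? (fun q => g q == g x) = none := by
              rw [List.find?_eq_none]
              intro q hq
              have := hbound q hq
              simp only [beq_iff_eq]
              omega
            simp [this]
          refine ⟨g x, x, ?_, ?_, hfind', rfl, ?_⟩
          · simp [List.foldl_append, hm, hlt]
          · intro q hq
            rcases List.mem_append.mp hq with h | h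
            · exact le_trans (hbound q h) (le_of_lt hlt)
            · simp at h; subst h; exact le_refl _
          · by_cases hx : -1 < g x
            · rw [if_pos hx]
              simp only [List.foldl_append]
              by_cases hmneg : -1 < m
              · rw [if_pos hmneg] at hafold
                rw [hafold]
                simp [hlt]
              · rw [if_neg hmneg] at hafold
                rw [hafold]
                simp [hx]
            · have hmx : ¬ (-1 < m) := by omega
              simp only [if_neg hmx] at hafold
              simp [List.foldl_append, hafold, hx]
        · -- maximum unchanged
          have hfind' : (l ++ [x]).find? (fun q => g q == m) = some p := by
            rw [List.find?_append, hfind]; rfl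
          refine ⟨m, p, ?_, ?_, hfind', hgp, ?_⟩
          · simp [List.foldl_append, hm, hlt]
          · intro q hq
            rcases List.mem_append.mp hq with h | h
            · exact hbound q h
            · simp at h; subst h; omega
          · by_cases hmneg : -1 < m
            · simp only [if_pos hmneg] at hafold
              have : ¬ (m < g x) := hlt
              simp [List.foldl_append, hafold, this, if_pos hmneg]
            · simp only [if_neg hmneg] at hafold
              have hx : ¬ (-1 < g x) := by omega
              simp [List.foldl_append, hafold, hx, if_neg hmneg]

-- ===== VERDICT =====
theorem find_top_extra_candidate_spec : Claim_equal_find_top_extra_candidate := by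
  intro rc hc hs _
  unfold Spec_find_top_extra_candidate find_top_extra_candidate find_top_extra_candidate_alt
  dsimp only
  rw [pv_foldl_guard (fun ic => (pvRuleSet rc).contains (pvNormalize ic.2))
        (fun (b : String × Int) ic => if b.2 < pvScore hs ic.1 then (ic.2, pvScore hs ic.1) else b)
        (PySem.List.enumerate hc) ("", -1),
      pv_foldl_guard (fun ic => (pvRuleSet rc).contains (pvNormalize ic.2))
        (fun (m : Option Int) ic => match m with
          | none => some (pvScore hs ic.1)
          | some v => if v < pvScore hs ic.1 then some (pvScore hs ic.1) else some v)
        (PySem.List.enumerate hc) none]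
  set l := (PySem.List.enumerate hc).filter
    (fun ic => !(pvRuleSet rc).contains (pvNormalize ic.2)) with hl
  rcases pv_invariant (fun ic => pvScore hs ic.1) l with ⟨_, hm, ha⟩ | ⟨m, p, hm, _, hfind, _, hafold⟩
  · rw [hm, ha]; simp
  · rw [hm]
    have hfind2 : (PySem.List.enumerate hc).find?
        (fun ic => !(pvRuleSet rc).contains (pvNormalize ic.2) && pvScore hs ic.1 == m)
        = some p := by
      rw [← pv_find?_filter]; exact hfind
    dsimp only
    rw [hfind2]
    by_cases hmneg : -1 < m
    · rw [if_pos hmneg] at hafold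
      rw [hafold]
    · rw [if_neg hmneg] at hafold
      rw [hafold]
      have h0 : m < 0 := by omega
      simp [h0]
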